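-- pv_equiv track=rewrite | github.com/fischmanb/superloop | py/auto_sdd/lib/validation.py | _extract_frontmatter
-- ===== SOURCE A (Python) =====
-- _FRONTMATTER_MARKER: str = "---"
--
-- def _extract_frontmatter(lines: list[str]) -> list[str]:
--     """Return lines between the first and second ``---`` markers."""
--     result: list[str] = []
--     marker_seen = 0
--     for line in lines:
--         if line == _FRONTMATTER_MARKER:
--             marker_seen += 1
--             if marker_seen == 2:
--                 break
--             continue
--         if marker_seen == 1:
--             result.append(line)
--     return result
-- ===== SOURCE B (Python) =====
-- _FRONTMATTER_MARKER: str = "---"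
--
-- def _extract_frontmatter(lines: list[str]) -> list[str]:
--     """Return lines between the first and second ``---`` markers."""
--     try:
--         start = lines.index(_FRONTMATTER_MARKER)
--     except ValueError:
--         return []
--     rest = lines[start + 1:]
--     try:
--         end = rest.index(_FRONTMATTER_MARKER)
--     except ValueError:
--         return rest
--     return rest[:end]
-- ===== Notes on version B (the rewrite author's own statement) =====
-- stated objective: simpler
-- what changed: Replaces the accumulating scan with a marker counter by two index lookups and a slice: find the first '---', slice off the tail, find the next '---' there and take up to it.
import Mathlib
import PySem

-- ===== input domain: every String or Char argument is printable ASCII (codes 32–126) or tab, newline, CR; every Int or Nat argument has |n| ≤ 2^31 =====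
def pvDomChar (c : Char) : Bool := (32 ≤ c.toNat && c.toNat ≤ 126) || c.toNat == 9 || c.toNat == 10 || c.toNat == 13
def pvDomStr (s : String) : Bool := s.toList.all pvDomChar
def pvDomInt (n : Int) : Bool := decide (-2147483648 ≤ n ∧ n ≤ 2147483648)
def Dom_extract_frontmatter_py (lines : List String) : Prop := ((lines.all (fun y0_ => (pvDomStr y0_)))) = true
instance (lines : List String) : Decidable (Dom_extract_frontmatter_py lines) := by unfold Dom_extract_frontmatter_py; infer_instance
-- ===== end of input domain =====

-- B is a simpler decomposition of A (index lookups + slices instead of an accumulating scan); return value only, no mutation.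

-- ===== PORT A =====
-- the for-loop of A with its state (result, marker_seen); 'break' = return result
def extractLoopA : List String → List String → Nat → List String
  | [], result, _ => result
  | line :: rest, result, seen =>
    if line = "---" then
      if seen + 1 = 2 then result
      else extractLoopA rest result (seen + 1)
    else if seen = 1 then extractLoopA rest (result ++ [line]) seen
    else extractLoopA rest result seen

def extract_frontmatter_py (lines : List String) : List String :=
  extractLoopA lines [] 0

-- ===== PORT B =====
def extract_frontmatter_py_alt (lines : List String) : List String :=
  match PySem.List.index? lines "---" with            -- lines.index("---"), ValueError → []
  | none => []
  | some start =>
    let rest := PySem.List.slice lines (some ((start : Int) + 1)) none   -- lines[start+1:]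
    match PySem.List.index? rest "---" with           -- rest.index("---"), ValueError → rest
    | none => rest
    | some e => PySem.List.slice rest none (some (e : Int))              -- rest[:e]

-- ===== PRECONDITION & SPEC =====
def Spec_extract_frontmatter_py (lines : List String) (out : List String) : Prop := out = extract_frontmatter_py_alt lines
instance (lines : List String) (out : List String) : Decidable (Spec_extract_frontmatter_py lines out) := by unfold Spec_extract_frontmatter_py; infer_instance

-- ===== CLAIM (what is proved, stated in full; the proofs are below) =====
def Claim_equal_extract_frontmatter_py : Prop := ∀ (lines : List String), Dom_extract_frontmatter_py lines → Spec_extract_frontmatter_py lines (extract_frontmatter_py lines)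

-- ===== LEMMAS AND PROOFS =====

-- what B computes on the tail after the first marker
def tailPart (rest : List String) : List String :=
  match PySem.List.index? rest "---" with
  | none => rest
  | some e => rest.take e

lemma alt_eq_tailPart (lines : List String) :
    extract_frontmatter_py_alt lines =
      match PySem.List.index? lines "---" with
      | none => []
      | some s => tailPart (lines.drop (s + 1)) := by
  unfold extract_frontmatter_py_alt tailPart
  cases h : PySem.List.index? lines "---" with
  | none => rfl
  | some s =>
    simp only []
    have h1 : ((s : Int) + 1) = ((s + 1 : Nat) : Int) := by push_cast; ring
    rw [h1, PySem.List.slice_from_natCast]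
    cases h2 : PySem.List.index? (lines.drop (s + 1)) "---" with
    | none => rfl
    | some e =>
      show PySem.List.slice (lines.drop (s + 1)) none (some (e : Int)) = (lines.drop (s + 1)).take e
      rw [PySem.List.slice_to_natCast]

lemma loopA_one (rest acc : List String) :
    extractLoopA rest acc 1 = acc ++ tailPart rest := by
  induction rest generalizing acc with
  | nil => simp [extractLoopA, tailPart, PySem.List.index?]
  | cons l t ih =>
    by_cases hl : l = "---"
    · subst hl
      have h0 : extractLoopA ("---" :: t) acc 1 = acc := by simp [extractLoopA]
      rw [h0]
      unfold tailPart
      rw [PySem.List.index?_cons_self]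
      simp
    · have hi := PySem.List.index?_cons_of_ne (v := "---") (xs := t) hl
      simp only [extractLoopA, if_neg hl, if_pos rfl]
      rw [ih]
      unfold tailPart
      rw [hi]
      cases h : PySem.List.index? t "---" <;> simp [h]

lemma loopA_zero (lines : List String) :
    extractLoopA lines [] 0 = extract_frontmatter_py_alt lines := by
  induction lines with
  | nil => simp [extractLoopA, extract_frontmatter_py_alt, PySem.List.index?]
  | cons l t ih =>
    rw [alt_eq_tailPart]
    by_cases hl : l = "---"
    · subst hl
      have h0 : extractLoopA ("---" :: t) [] 0 = extractLoopA t [] 1 := by simp [extractLoopA]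
      rw [h0, PySem.List.index?_cons_self, loopA_one]
      simp
    · have hi := PySem.List.index?_cons_of_ne (v := "---") (xs := t) hl
      simp only [extractLoopA, if_neg hl]
      rw [ih, alt_eq_tailPart, hi]
      cases h : PySem.List.index? t "---" <;> simp [h]

-- ===== VERDICT (by name: the statement is the Claim_ definition above) =====
theorem extract_frontmatter_py_spec : Claim_equal_extract_frontmatter_py := by
  intro lines _
  unfold Spec_extract_frontmatter_py extract_frontmatter_py
  exact loopA_zero lines
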